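-- pv_equiv track=rewrite | github.com/real-wimpSquad/better-breeze-checkin | api/codes.py | encode_checkin_code
-- ===== SOURCE A (Python) =====
-- ALPHABET = "23456789ABCDEFGHJKMNPQRSTUVWXYZ"
--
-- BASE = len(ALPHABET)
--
-- def _checksum(data: int) -> int:
--     """Simple checksum: sum of nibbles mod BASE."""
--     total = 0
--     while data:
--         total += data & 0xF
--         data >>= 4
--     return total % BASE
--
-- def encode_checkin_code(person_id: str | int, instance_id: str | int) -> str:
--     """
--     Generate a check-in code encoding person and instance.
--
--     Returns a 7-character code like "A3K-M9P2"
--     """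
--     pid = int(person_id) if isinstance(person_id, str) else person_id
--     iid = int(instance_id) if isinstance(instance_id, str) else instance_id
--
--     # Pack: [instance:15][person:15] = 30 bits
--     packed = ((iid & 0x7FFF) << 15) | (pid & 0x7FFF)
--
--     # Convert to base30 (LSB first)
--     chars = []
--     temp = packed
--     for _ in range(6):
--         chars.append(ALPHABET[temp % BASE])
--         temp //= BASE
--
--     # Reverse to get MSB first
--     chars = chars[::-1]
--
--     # Add checksum at the end
--     chars.append(ALPHABET[_checksum(packed)])
--
--     code = ''.join(chars)
--     return f"{code[:3]}-{code[3:]}"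
-- ===== SOURCE B (Python) =====
-- ALPHABET = "23456789ABCDEFGHJKMNPQRSTUVWXYZ"
--
-- BASE = len(ALPHABET)
--
--
-- def _nibble_sum(n):
--     """Sum of base-16 digits, by recursion on the value."""
--     return 0 if n == 0 else n % 16 + _nibble_sum(n // 16)
--
--
-- def _base31(n, k):
--     """The k low base-BASE digits of n as a string, most significant first."""
--     return "" if k == 0 else _base31(n // BASE, k - 1) + ALPHABET[n % BASE]
--
--
-- def encode_checkin_code(person_id, instance_id):
--     pid = int(person_id) if isinstance(person_id, str) else person_id
--     iid = int(instance_id) if isinstance(instance_id, str) else instance_id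
--
--     # 15+15-bit pack, written arithmetically: x & 0x7FFF == x % 32768 for every int,
--     # and the two 15-bit fields occupy disjoint positions, so | becomes +.
--     packed = (iid % 32768) * 32768 + pid % 32768
--
--     # Split the 6 code digits into the top 3 and bottom 3 via one divmod,
--     # so the hyphen needs no slicing and the digits no reversal.
--     hi, lo = divmod(packed, BASE ** 3)
--     return _base31(hi, 3) + "-" + _base31(lo, 3) + ALPHABET[_nibble_sum(packed) % BASE]
-- ===== Notes on version B (the rewrite author's own statement) =====
-- stated objective: alternative
-- what changed: B packs arithmetically ((iid % 32768) * 32768 + pid % 32768) instead of A's mask/shift/or bit operations, splits the six code digits into top and bottom halves with one divmod so the hyphen is placed by concatenation with no slicing, renders each 3-digit group by a recursive most-significant-first helper with no reversal, and computes the checksum as a recursive base-16 digit sum instead of A's bit-masking while loop.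
import Mathlib
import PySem

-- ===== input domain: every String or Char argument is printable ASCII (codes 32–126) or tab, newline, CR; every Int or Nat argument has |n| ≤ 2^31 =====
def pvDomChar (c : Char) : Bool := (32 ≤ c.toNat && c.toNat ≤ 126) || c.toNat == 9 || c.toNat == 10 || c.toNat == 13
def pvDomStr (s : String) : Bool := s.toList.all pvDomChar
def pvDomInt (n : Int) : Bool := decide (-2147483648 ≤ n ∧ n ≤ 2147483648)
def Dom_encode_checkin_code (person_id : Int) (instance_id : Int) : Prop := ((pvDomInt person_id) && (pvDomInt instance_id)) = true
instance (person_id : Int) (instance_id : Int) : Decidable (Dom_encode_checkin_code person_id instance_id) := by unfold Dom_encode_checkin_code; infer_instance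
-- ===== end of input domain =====

-- B packs arithmetically (mod/mul/add instead of mask/shift/or), splits the six digits
-- with one divmod into two 3-digit groups rendered by a recursive MSB-first helper (no
-- reversal, no slicing), and sums base-16 digits recursively for the checksum; objective:
-- alternative. Lean parameters are Int, so the Python `int(x) if isinstance(x, str)`
-- coercion branch is never taken and is ported as the identity.

-- ===== PORT A =====
def pvAlpha : String := "23456789ABCDEFGHJKMNPQRSTUVWXYZ"

def pvBase : Int := PySem.Str.len pvAlpha

-- the `while data:` loop of A's _checksum; exact for data ≥ 0 (its only use: packed ≥ 0)
def pvChecksumLoop (data : Nat) (total : Int) : Int :=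
  if data = 0 then total
  else pvChecksumLoop (data >>> 4) (total + (data &&& 15 : Nat))
  termination_by data
  decreasing_by
    simp only [Nat.shiftRight_eq_div_pow]
    exact Nat.div_lt_self (Nat.pos_of_ne_zero (by assumption)) (by norm_num)

def pvChecksum (data : Int) : Int :=
  PySem.Int.mod (pvChecksumLoop data.toNat 0) pvBase

-- ''.join and the f"{code[:3]}-{code[3:]}" slicing are done on the code-point list (exact)
def encode_checkin_code (person_id : Int) (instance_id : Int) : String :=
  let pid := person_id
  let iid := instance_id
  let packed := PySem.Int.bor ((PySem.Int.band iid 0x7FFF) <<< 15) (PySem.Int.band pid 0x7FFF)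
  let st := (PySem.List.pyRange 0 6 1).foldl
      (fun (s : List Char × Int) _ =>
        (s.1 ++ [(PySem.Str.pyGet? pvAlpha (PySem.Int.mod s.2 pvBase)).getD ' '],
         PySem.Int.floordiv s.2 pvBase)) ([], packed)
  let chars := st.1.reverse ++ [(PySem.Str.pyGet? pvAlpha (pvChecksum packed)).getD ' ']
  String.ofList (PySem.Chars.slice chars none (some 3) ++ ['-'] ++ PySem.Chars.slice chars (some 3) none)

-- ===== PORT B =====
-- B's _nibble_sum, recursion on the value; exact for n ≥ 0 (its only use: packed ≥ 0)
def pvNibbleSum (n : Nat) : Int :=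
  if n = 0 then 0 else (n % 16 : Nat) + pvNibbleSum (n / 16)
  termination_by n
  decreasing_by exact Nat.div_lt_self (Nat.pos_of_ne_zero (by assumption)) (by norm_num)

-- B's _base31: the k low base-BASE digits of n, most significant first
def pvBase31 (n : Int) (k : Nat) : List Char :=
  match k with
  | 0 => []
  | k + 1 =>
      pvBase31 (PySem.Int.floordiv n pvBase) k
        ++ [(PySem.Str.pyGet? pvAlpha (PySem.Int.mod n pvBase)).getD ' ']

def encode_checkin_code_alt (person_id : Int) (instance_id : Int) : String :=
  let pid := person_id
  let iid := instance_id
  let packed := (PySem.Int.mod iid 32768) * 32768 + PySem.Int.mod pid 32768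
  let hi := PySem.Int.floordiv packed (pvBase ^ 3)
  let lo := PySem.Int.mod packed (pvBase ^ 3)
  String.ofList (pvBase31 hi 3 ++ ['-'] ++ pvBase31 lo 3
    ++ [(PySem.Str.pyGet? pvAlpha (PySem.Int.mod (pvNibbleSum packed.toNat) pvBase)).getD ' '])

-- ===== PRECONDITION & SPEC =====
def Spec_encode_checkin_code (person_id : Int) (instance_id : Int) (out : String) : Prop := out = encode_checkin_code_alt person_id instance_id
instance (person_id : Int) (instance_id : Int) (out : String) : Decidable (Spec_encode_checkin_code person_id instance_id out) := by unfold Spec_encode_checkin_code; infer_instance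

-- ===== CLAIM (what is proved, stated in full; the proofs are below) =====
def Claim_equal_encode_checkin_code : Prop := ∀ (person_id : Int) (instance_id : Int), Dom_encode_checkin_code person_id instance_id → Spec_encode_checkin_code person_id instance_id (encode_checkin_code person_id instance_id)

-- ===== LEMMAS AND PROOFS =====

theorem pvBase_eq : pvBase = 31 := by decide

-- one base-31 digit character of n, MSB position k
def pvDig (n k : Nat) : Char :=
  (PySem.Str.pyGet? pvAlpha ((n / 31 ^ k % 31 : Nat) : Int)).getD ' '

-- x & 0x7FFF in Python is x mod 2^15, for EVERY integer x
theorem pv_band_mask (x : Int) : PySem.Int.band x 0x7FFF = PySem.Int.mod x 32768 := by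
  rw [PySem.Int.mod_eq_emod_of_pos (by norm_num : (0:Int) < 32768)]
  unfold PySem.Int.band
  by_cases hx : 0 ≤ x
  · simp only [hx, if_true, (by norm_num : (0:Int) ≤ 0x7FFF), if_true]
    obtain ⟨m, rfl⟩ := Int.eq_ofNat_of_zero_le hx
    have h15 : (m : Int).toNat &&& (0x7FFF : Int).toNat = m % 2 ^ 15 := by
      have := Nat.and_two_pow_sub_one_eq_mod m 15
      simpa using this
    rw [h15]
    omega
  · simp only [hx, if_false, (by norm_num : (0:Int) ≤ 0x7FFF), if_true]
    set m : Nat := (-x - 1).toNat with hm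
    have hxm : x = -(m : Int) - 1 := by omega
    have h15 : (0x7FFF : Int).toNat &&& m = m % 2 ^ 15 := by
      have := Nat.and_two_pow_sub_one_eq_mod m 15
      simpa [Nat.and_comm] using this
    rw [h15, hxm]
    have hr : m % 2 ^ 15 < 2 ^ 15 := Nat.mod_lt _ (by norm_num)
    have hq : 2 ^ 15 * (m / 2 ^ 15) + m % 2 ^ 15 = m := Nat.div_add_mod m (2 ^ 15)
    omega

-- the packed value, computed arithmetically (B) and bitwise (A), agree
theorem pv_pack_eq (pid iid : Int) :
    (PySem.Int.mod iid 32768) * 32768 + PySem.Int.mod pid 32768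
      = PySem.Int.bor ((PySem.Int.band iid 0x7FFF) <<< 15) (PySem.Int.band pid 0x7FFF) := by
  rw [pv_band_mask, pv_band_mask]
  have ha0 : 0 ≤ PySem.Int.mod iid 32768 := PySem.Int.mod_nonneg _ (by norm_num : (0:Int) < 32768)
  have hb0 : 0 ≤ PySem.Int.mod pid 32768 := PySem.Int.mod_nonneg _ (by norm_num : (0:Int) < 32768)
  have hblt : PySem.Int.mod pid 32768 < 32768 := PySem.Int.mod_lt _ (by norm_num : (0:Int) < 32768)
  obtain ⟨a, hA⟩ := Int.eq_ofNat_of_zero_le ha0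
  obtain ⟨b, hB⟩ := Int.eq_ofNat_of_zero_le hb0
  rw [hA, hB]
  have hsh : ((a : Int) <<< 15) = ((a <<< 15 : Nat) : Int) := rfl
  rw [hsh, PySem.Int.bor_natCast]
  have hb15 : b < 2 ^ 15 := by exact_mod_cast hB ▸ hblt
  rw [← Nat.shiftLeft_add_eq_or_of_lt hb15]
  push_cast [Nat.shiftLeft_eq]
  ring

-- A's six-step fold on ↑n yields the LSB-first digit list
theorem pvA_digits (n : Nat) :
    ((PySem.List.pyRange 0 6 1).foldl
      (fun (s : List Char × Int) _ =>
        (s.1 ++ [(PySem.Str.pyGet? pvAlpha (PySem.Int.mod s.2 pvBase)).getD ' '],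
         PySem.Int.floordiv s.2 pvBase)) ([], (n : Int))).1
    = [pvDig n 0, pvDig n 1, pvDig n 2, pvDig n 3, pvDig n 4, pvDig n 5] := by
  have hr : PySem.List.pyRange 0 6 1 = [0, 1, 2, 3, 4, 5] := by decide
  rw [hr, pvBase_eq]
  have hd : ∀ m : Nat, PySem.Int.floordiv (m : Int) (31 : Int) = ((m / 31 : Nat) : Int) := by
    intro m; exact_mod_cast PySem.Int.floordiv_natCast m 31
  have hm : ∀ m : Nat, PySem.Int.mod (m : Int) (31 : Int) = ((m % 31 : Nat) : Int) := by
    intro m; exact_mod_cast PySem.Int.mod_natCast m 31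
  simp only [List.foldl, hd, hm, pvDig]
  norm_num [Nat.div_div_eq_div_mul]

-- B's 3-digit group on ↑m renders digits 2,1,0 of m
theorem pvB_group (m : Nat) :
    pvBase31 (m : Int) 3 = [pvDig m 2, pvDig m 1, pvDig m 0] := by
  simp only [pvBase31, pvBase_eq]
  have hd : ∀ j : Nat, PySem.Int.floordiv (j : Int) (31 : Int) = ((j / 31 : Nat) : Int) := by
    intro j; exact_mod_cast PySem.Int.floordiv_natCast j 31
  have hm : ∀ j : Nat, PySem.Int.mod (j : Int) (31 : Int) = ((j % 31 : Nat) : Int) := by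
    intro j; exact_mod_cast PySem.Int.mod_natCast j 31
  simp only [hd, hm, pvDig]
  norm_num [Nat.div_div_eq_div_mul]

-- digits of the top half are the top digits
theorem pvDig_hi (n k : Nat) : pvDig (n / 31 ^ 3) k = pvDig n (3 + k) := by
  unfold pvDig
  rw [Nat.div_div_eq_div_mul, ← pow_add]

-- digits of the bottom half are the bottom digits (k < 3)
theorem pvDig_lo (n k : Nat) (hk : k < 3) : pvDig (n % 31 ^ 3) k = pvDig n k := by
  unfold pvDig
  have h3 : (31 : Nat) ^ 3 = 31 ^ k * 31 ^ (3 - k) := by rw [← pow_add]; congr 1; omega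
  rw [h3, Nat.mod_mul_right_div_self, Nat.mod_mod_of_dvd _ (dvd_pow_self 31 (by omega))]

-- the two checksum recursions agree
theorem pv_checksum_eq (n : Nat) : ∀ t : Int, pvChecksumLoop n t = t + pvNibbleSum n := by
  induction n using Nat.strong_induction_on with
  | _ n ih =>
    intro t
    unfold pvChecksumLoop pvNibbleSum
    by_cases h : n = 0
    · simp [h]
    · simp only [h, if_false]
      have hand : n &&& 15 = n % 16 := by
        have := Nat.and_two_pow_sub_one_eq_mod n 4
        simpa using this
      have hshift : n >>> 4 = n / 16 := by
        rw [Nat.shiftRight_eq_div_pow]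
      rw [hand, hshift]
      rw [ih (n / 16) (Nat.div_lt_self (Nat.pos_of_ne_zero h) (by norm_num))]
      ring

theorem pv_packed_nonneg (pid iid : Int) :
    0 ≤ (PySem.Int.mod iid 32768) * 32768 + PySem.Int.mod pid 32768 := by
  have ha0 : 0 ≤ PySem.Int.mod iid 32768 := PySem.Int.mod_nonneg _ (by norm_num : (0:Int) < 32768)
  have hb0 : 0 ≤ PySem.Int.mod pid 32768 := PySem.Int.mod_nonneg _ (by norm_num : (0:Int) < 32768)
  nlinarith

-- ===== VERDICT (by name: the statement is the Claim_ definition above) =====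
theorem encode_checkin_code_spec : Claim_equal_encode_checkin_code := by
  intro pid iid _
  unfold Spec_encode_checkin_code encode_checkin_code encode_checkin_code_alt
  dsimp only
  rw [← pv_pack_eq pid iid]
  obtain ⟨n, hn⟩ := Int.eq_ofNat_of_zero_le (pv_packed_nonneg pid iid)
  norm_cast
  rw [hn, pvA_digits n]
  -- B's halves
  have hpow : pvBase ^ 3 = ((31 ^ 3 : Nat) : Int) := by rw [pvBase_eq]; norm_num
  have hhi : PySem.Int.floordiv (n : Int) (pvBase ^ 3) = ((n / 31 ^ 3 : Nat) : Int) := by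
    rw [hpow]; exact_mod_cast PySem.Int.floordiv_natCast n (31 ^ 3)
  have hlo : PySem.Int.mod (n : Int) (pvBase ^ 3) = ((n % 31 ^ 3 : Nat) : Int) := by
    rw [hpow]; exact_mod_cast PySem.Int.mod_natCast n (31 ^ 3)
  rw [hhi, hlo, pvB_group, pvB_group,
    pvDig_hi n 2, pvDig_hi n 1, pvDig_hi n 0,
    pvDig_lo n 2 (by norm_num), pvDig_lo n 1 (by norm_num), pvDig_lo n 0 (by norm_num)]
  -- checksums
  unfold pvChecksum
  rw [Int.toNat_natCast, pv_checksum_eq n 0, zero_add]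
  -- both sides are now explicit 7-character lists
  simp [PySem.Chars.slice, PySem.List.slice_to, PySem.List.slice_from]
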